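-- pv_equiv track=rewrite | github.com/jacobbamio/core-oss | core-api/api/services/email/mark_read_unread.py | _update_labels_array
-- ===== SOURCE A (Python) =====
-- def _update_labels_array(labels: list, add: list = None, remove: list = None) -> list:
--     """
--     Update labels array by adding/removing labels.
--
--     Args:
--         labels: Current labels array
--         add: Labels to add
--         remove: Labels to remove
--
--     Returns:
--         Updated labels array
--     """
--     result = set(labels or [])
--
--     if remove:
--         for label in remove:
--             result.discard(label)
--
--     if add:
--         for label in add:
--             result.add(label)
--
--     return sorted(list(result))
-- ===== SOURCE B (Python) =====
-- def _update_labels_array(labels: list, add: list = None, remove: list = None) -> list: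
--     """Sort-then-scan variant: filter out removed labels, append adds, sort,
--     then deduplicate by comparing adjacent elements."""
--     rem = set(remove or [])
--     merged = sorted([x for x in (labels or []) if x not in rem] + list(add or []))
--     out = []
--     for x in merged:
--         if not out or out[-1] != x:
--             out.append(x)
--     return out
-- ===== Notes on version B (the rewrite author's own statement) =====
-- stated objective: alternative
-- what changed: Replaces the hash-set build/discard/add with a filter against a remove-set, appending the adds, sorting the raw (possibly duplicated) list, and deduplicating by a single adjacent-comparison scan over the sorted list.
import Mathlib
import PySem

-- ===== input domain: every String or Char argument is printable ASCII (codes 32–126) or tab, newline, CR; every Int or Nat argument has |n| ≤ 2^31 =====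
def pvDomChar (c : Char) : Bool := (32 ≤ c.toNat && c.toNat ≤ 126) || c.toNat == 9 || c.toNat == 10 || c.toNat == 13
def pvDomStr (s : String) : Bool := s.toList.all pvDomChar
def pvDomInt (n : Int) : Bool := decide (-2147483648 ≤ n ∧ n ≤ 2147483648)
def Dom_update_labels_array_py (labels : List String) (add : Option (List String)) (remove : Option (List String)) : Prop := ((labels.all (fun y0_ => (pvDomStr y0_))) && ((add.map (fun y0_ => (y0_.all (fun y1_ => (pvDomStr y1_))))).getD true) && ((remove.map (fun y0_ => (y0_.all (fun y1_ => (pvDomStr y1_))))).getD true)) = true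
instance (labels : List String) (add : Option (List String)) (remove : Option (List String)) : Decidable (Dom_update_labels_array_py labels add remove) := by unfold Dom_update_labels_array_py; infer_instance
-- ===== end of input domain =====

-- B replaces A's hash-set discard/add with filter + append + sort + adjacent-dedup scan (alternative decomposition, no speed claim).

-- ===== PORT A =====
-- the 'if remove:' block of A
def pvApplyRemove (remove : Option (List String)) (s : PySem.Set String) : PySem.Set String :=
  match remove with
  | none => s
  | some r => if r.isEmpty then s else r.foldl (fun acc label => PySem.Set.discard acc label) s

-- the 'if add:' block of A
def pvApplyAdd (add : Option (List String)) (s : PySem.Set String) : PySem.Set String :=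
  match add with
  | none => s
  | some a => if a.isEmpty then s else a.foldl (fun acc label => PySem.Set.add acc label) s

def update_labels_array_py (labels : List String) (add : Option (List String)) (remove : Option (List String)) : List String :=
  PySem.List.sorted
    (pvApplyAdd add (pvApplyRemove remove
      (PySem.Set.ofList (if labels.isEmpty then [] else labels))))
    (fun x => x) false

-- ===== PORT B =====
def update_labels_array_py_alt (labels : List String) (add : Option (List String)) (remove : Option (List String)) : List String :=
  let rem : PySem.Set String := PySem.Set.ofList (remove.getD [])
  let merged := PySem.List.sorted
    ((labels.filter (fun x => !(PySem.Set.contains rem x))) ++ add.getD []) (fun x => x) false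
  merged.foldl (fun out x => if out = [] ∨ out.getLast? ≠ some x then out ++ [x] else out) []

-- ===== PRECONDITION & SPEC =====
def Spec_update_labels_array_py (labels : List String) (add : Option (List String)) (remove : Option (List String)) (out : List String) : Prop := out = update_labels_array_py_alt labels add remove
instance (labels : List String) (add : Option (List String)) (remove : Option (List String)) (out : List String) : Decidable (Spec_update_labels_array_py labels add remove out) := by unfold Spec_update_labels_array_py; infer_instance

-- ===== CLAIM (what is proved, stated in full; the proofs are below) =====
def Claim_equal_update_labels_array_py : Prop := ∀ (labels : List String) (add : Option (List String)) (remove : Option (List String)), Dom_update_labels_array_py labels add remove → Spec_update_labels_array_py labels add remove (update_labels_array_py labels add remove)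

-- ===== LEMMAS AND PROOFS =====

-- membership and nodup facts about A's set pipeline
theorem mem_foldl_discard (r : List String) (s : PySem.Set String) (x : String) :
    x ∈ r.foldl (fun acc label => PySem.Set.discard acc label) s ↔ x ∈ s ∧ x ∉ r := by
  induction r generalizing s with
  | nil => simp
  | cons h t ih =>
    simp [List.foldl_cons, ih, PySem.Set.mem_discard]
    tauto

theorem nodup_foldl_discard (r : List String) (s : PySem.Set String) (hs : s.Nodup) :
    (r.foldl (fun acc label => PySem.Set.discard acc label) s).Nodup := by
  induction r generalizing s with
  | nil => exact hs
  | cons h t ih => exact ih _ (PySem.Set.nodup_discard _ _ hs)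

theorem mem_foldl_add' (a : List String) (s : PySem.Set String) (x : String) :
    x ∈ a.foldl (fun acc label => PySem.Set.add acc label) s ↔ x ∈ s ∨ x ∈ a := by
  induction a generalizing s with
  | nil => simp
  | cons h t ih =>
    simp [List.foldl_cons, ih, PySem.Set.mem_add]
    tauto

theorem nodup_foldl_add (a : List String) (s : PySem.Set String) (hs : s.Nodup) :
    (a.foldl (fun acc label => PySem.Set.add acc label) s).Nodup := by
  induction a generalizing s with
  | nil => exact hs
  | cons h t ih => exact ih _ (PySem.Set.nodup_add _ _ hs)

theorem mem_applyRemove (remove : Option (List String)) (s : PySem.Set String) (x : String) :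
    x ∈ pvApplyRemove remove s ↔ x ∈ s ∧ x ∉ remove.getD [] := by
  cases remove with
  | none => simp [pvApplyRemove]
  | some r =>
    by_cases hr : r.isEmpty
    · simp [pvApplyRemove, List.isEmpty_iff.mp hr]
    · simp [pvApplyRemove, hr, mem_foldl_discard]

theorem nodup_applyRemove (remove : Option (List String)) (s : PySem.Set String) (hs : s.Nodup) :
    (pvApplyRemove remove s).Nodup := by
  cases remove with
  | none => exact hs
  | some r =>
    by_cases hr : r.isEmpty
    · simpa [pvApplyRemove, hr] using hs
    · simpa [pvApplyRemove, hr] using nodup_foldl_discard r s hs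

theorem mem_applyAdd (add : Option (List String)) (s : PySem.Set String) (x : String) :
    x ∈ pvApplyAdd add s ↔ x ∈ s ∨ x ∈ add.getD [] := by
  cases add with
  | none => simp [pvApplyAdd]
  | some a =>
    by_cases ha : a.isEmpty
    · simp [pvApplyAdd, List.isEmpty_iff.mp ha]
    · simp [pvApplyAdd, ha, mem_foldl_add']

theorem nodup_applyAdd (add : Option (List String)) (s : PySem.Set String) (hs : s.Nodup) :
    (pvApplyAdd add s).Nodup := by
  cases add with
  | none => exact hs
  | some a =>
    by_cases ha : a.isEmpty
    · simpa [pvApplyAdd, ha] using hs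
    · simpa [pvApplyAdd, ha] using nodup_foldl_add a s hs

-- adjacent-dedup recursion used to characterise B's final foldl
def pvDD : Option String → List String → List String
  | _, [] => []
  | p, x :: t => if p = some x then pvDD p t else x :: pvDD (some x) t

theorem foldl_pvDD (l : List String) (acc : List String) :
    l.foldl (fun out x => if out = [] ∨ out.getLast? ≠ some x then out ++ [x] else out) acc
      = acc ++ pvDD acc.getLast? l := by
  induction l generalizing acc with
  | nil => simp [pvDD]
  | cons x t ih =>
    by_cases h : acc.getLast? = some x
    · have hne : acc ≠ [] := by
        intro hnil; rw [hnil] at h; simp at h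
      have hstep : (if acc = [] ∨ acc.getLast? ≠ some x then acc ++ [x] else acc) = acc := by
        simp [hne, h]
      rw [List.foldl_cons, hstep, ih, h]
      simp [pvDD]
    · simp only [List.foldl_cons, pvDD]
      have : (if acc = [] ∨ acc.getLast? ≠ some x then acc ++ [x] else acc) = acc ++ [x] := by
        by_cases hnil : acc = [] <;> simp [hnil, h]
      rw [this, ih, if_neg h]
      simp

theorem pvDD_spec (l : List String) (p : Option String)
    (hsort : l.Pairwise (· ≤ ·)) (hlb : ∀ y ∈ l, ∀ a, p = some a → a ≤ y) :
    (pvDD p l).Pairwise (· < ·) ∧ ∀ x, (x ∈ pvDD p l ↔ x ∈ l ∧ ∀ a, p = some a → x ≠ a) := by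
  induction l generalizing p with
  | nil => simp [pvDD]
  | cons x t ih =>
    have hx : ∀ y ∈ t, x ≤ y := fun y hy => (List.pairwise_cons.mp hsort).1 y hy
    have ht : t.Pairwise (· ≤ ·) := (List.pairwise_cons.mp hsort).2
    have ihr := ih (some x) ht (by intro y hy a ha; cases Option.some.inj ha; exact hx y hy)
    by_cases h : p = some x
    · subst h
      rw [show pvDD (some x) (x :: t) = pvDD (some x) t from by simp [pvDD]]
      refine ⟨ihr.1, fun z => ?_⟩
      rw [ihr.2 z]
      constructor
      · rintro ⟨hz, hne⟩
        exact ⟨List.mem_cons_of_mem _ hz, hne⟩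
      · rintro ⟨hz, hne⟩
        rcases List.mem_cons.mp hz with h1 | h1
        · exact absurd h1 (hne x rfl)
        · exact ⟨h1, hne⟩
    · simp only [pvDD, if_neg h]
      constructor
      · refine List.pairwise_cons.mpr ⟨?_, ihr.1⟩
        intro z hz
        rcases (ihr.2 z).mp hz with ⟨hzt, hne⟩
        exact lt_of_le_of_ne (hx z hzt) (Ne.symm (hne x rfl))
      · intro z
        rw [List.mem_cons, ihr.2 z]
        constructor
        · rintro (rfl | ⟨hzt, hne⟩)
          · refine ⟨List.mem_cons_self, ?_⟩
            intro a ha hr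
            exact h (ha.trans (by rw [hr]))
          · refine ⟨List.mem_cons_of_mem _ hzt, ?_⟩
            intro a ha hzeq
            have h1 : a ≤ x := hlb x List.mem_cons_self a ha
            have h2 : x ≤ z := hx z hzt
            exact hne x rfl (le_antisymm (hzeq ▸ h1) h2)
        · rintro ⟨hz, hne⟩
          rcases List.mem_cons.mp hz with rfl | hzt
          · exact Or.inl rfl
          · by_cases hzx : z = x
            · exact Or.inl hzx
            · exact Or.inr ⟨hzt, fun a ha => Option.some.inj ha ▸ hzx⟩

-- ===== VERDICT (by name: the statement is the Claim_ definition above) =====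
theorem update_labels_array_py_spec : Claim_equal_update_labels_array_py := by
  intro labels add remove _
  unfold Spec_update_labels_array_py update_labels_array_py update_labels_array_py_alt
  simp only []
  set S : PySem.Set String :=
    pvApplyAdd add (pvApplyRemove remove (PySem.Set.ofList (if labels.isEmpty then [] else labels))) with hS
  set merged : List String := PySem.List.sorted
    ((labels.filter (fun x => !(PySem.Set.contains (PySem.Set.ofList (remove.getD [])) x))) ++ add.getD [])
    (fun x => x) false with hm
  rw [foldl_pvDD]
  simp only [List.getLast?_nil, List.nil_append]
  have hsort : merged.Pairwise (· ≤ ·) := by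
    rw [hm]
    exact PySem.List.sorted_pairwise _ _
  have hdd := pvDD_spec merged none hsort (by simp)
  -- membership of S
  have hmemS : ∀ x, x ∈ S ↔ (x ∈ labels ∧ x ∉ remove.getD []) ∨ x ∈ add.getD [] := by
    intro x
    rw [hS, mem_applyAdd, mem_applyRemove, PySem.Set.mem_ofList]
    by_cases hl : labels.isEmpty
    · simp [List.isEmpty_iff.mp hl]
    · simp [hl]
  have hnodupS : S.Nodup :=
    nodup_applyAdd _ _ (nodup_applyRemove _ _ (PySem.Set.nodup_ofList _))
  -- membership of B's output
  have hmemB : ∀ x, x ∈ pvDD none merged ↔ (x ∈ labels ∧ x ∉ remove.getD []) ∨ x ∈ add.getD [] := by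
    intro x
    rw [hdd.2 x]
    simp [hm, PySem.List.mem_sorted, PySem.Set.mem_ofList]
  have hnodupB : (pvDD none merged).Nodup :=
    hdd.1.imp (fun h => ne_of_lt h)
  have hperm : (pvDD none merged).Perm S :=
    (List.perm_ext_iff_of_nodup hnodupB hnodupS).mpr (fun x => (hmemB x).trans (hmemS x).symm)
  exact PySem.List.sorted_eq_of_perm_of_pairwise_lt _ _ _ hperm hdd.1
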